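-- pv_equiv track=rewrite | github.com/kmk142789/kmk142789 | verifier/verify_puzzle_signature.py | _looks_like_base58
-- ===== SOURCE A (Python) =====
-- BASE58_ALPHABET = b"123456789ABCDEFGHJKLMNPQRSTUVWXYZabcdefghijkmnopqrstuvwxyz"
--
-- def _looks_like_base58(value: str) -> bool:
--     """Return True if the token resembles a Base58 string (optionally dashed)."""
--
--     if not value:
--         return False
--     cleaned = value.replace("-", "")
--     if not cleaned:
--         return False
--     try:
--         candidate = cleaned.encode("ascii")
--     except UnicodeEncodeError:
--         return False
--     return all(byte in BASE58_ALPHABET for byte in candidate)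
-- ===== SOURCE B (Python) =====
-- import re
--
-- _B58_RE = re.compile(r"[1-9A-HJ-NP-Za-km-z]+")
--
-- def _looks_like_base58(value: str) -> bool:
--     """Return True if the token resembles a Base58 string (optionally dashed)."""
--     cleaned = value.replace("-", "")
--     return bool(_B58_RE.fullmatch(cleaned))
-- ===== Notes on version B (the rewrite author's own statement) =====
-- stated objective: idiomatic
-- what changed: B strips dashes and validates with one compiled-regex fullmatch over the Base58 character class [1-9A-HJ-NP-Za-km-z]+, replacing A's guard chain, ASCII encode/try-except and byte-by-byte alphabet membership loop (the + quantifier rejects the empty string, the ASCII-only ranges reject non-ASCII).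
import Mathlib
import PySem

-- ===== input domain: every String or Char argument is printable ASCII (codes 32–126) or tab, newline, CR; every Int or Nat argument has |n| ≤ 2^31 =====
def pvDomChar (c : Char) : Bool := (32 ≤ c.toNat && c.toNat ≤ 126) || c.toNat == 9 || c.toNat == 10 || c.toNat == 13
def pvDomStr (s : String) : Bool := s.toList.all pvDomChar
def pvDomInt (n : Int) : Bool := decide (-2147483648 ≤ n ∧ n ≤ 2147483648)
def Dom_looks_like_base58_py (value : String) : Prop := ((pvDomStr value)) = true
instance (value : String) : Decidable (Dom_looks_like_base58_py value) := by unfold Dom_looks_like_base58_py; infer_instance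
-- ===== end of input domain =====

-- B validates by a regex full-match over the dash-stripped string instead of A's guard chain,
-- ASCII-encode attempt and byte-by-byte alphabet membership loop; objective: more idiomatic.

-- ===== PORT A =====
-- the byte values of BASE58_ALPHABET = b"123456789…z"
def base58Codes : List Nat :=
  [49, 50, 51, 52, 53, 54, 55, 56, 57, 65, 66, 67, 68, 69, 70, 71, 72, 74, 75, 76,
   77, 78, 80, 81, 82, 83, 84, 85, 86, 87, 88, 89, 90, 97, 98, 99, 100, 101, 102,
   103, 104, 105, 106, 107, 109, 110, 111, 112, 113, 114, 115, 116, 117, 118, 119,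
   120, 121, 122]

def looks_like_base58_py (value : String) : Bool :=
  -- if not value: return False
  if value.toList = [] then false
  else
    -- cleaned = value.replace("-", ""): with a one-char needle and empty replacement,
    -- str.replace is exactly dropping every '-' (hand port; exact)
    let cleaned := value.toList.filter (fun c => c ≠ '-')
    -- if not cleaned: return False
    if cleaned = [] then false
    else
      -- cleaned.encode("ascii") raises UnicodeEncodeError iff some char code ≥ 128
      if cleaned.all (fun c => decide (c.toNat < 128)) then
        -- all(byte in BASE58_ALPHABET for byte in candidate)
        cleaned.all (fun c => base58Codes.contains c.toNat)
      else false

-- ===== PORT B =====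
-- the character class [1-9A-HJ-NP-Za-km-z] of B's regex, as code ranges
def b58Class (c : Char) : Bool :=
  (49 ≤ c.toNat && c.toNat ≤ 57) || (65 ≤ c.toNat && c.toNat ≤ 72) ||
  (74 ≤ c.toNat && c.toNat ≤ 78) || (80 ≤ c.toNat && c.toNat ≤ 90) ||
  (97 ≤ c.toNat && c.toNat ≤ 107) || (109 ≤ c.toNat && c.toNat ≤ 122)

def looks_like_base58_py_alt (value : String) : Bool :=
  -- cleaned = value.replace("-", ""): drop every '-' (hand port; exact, see port A)
  let cleaned := value.toList.filter (fun c => c ≠ '-')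
  -- bool(re.fullmatch(r"[1-9A-HJ-NP-Za-km-z]+", cleaned)): ported exactly as
  -- "cleaned is nonempty and every character is in the class" (the semantics of [class]+)
  !cleaned.isEmpty && cleaned.all b58Class

-- ===== PRECONDITION & SPEC =====
def Spec_looks_like_base58_py (value : String) (out : Bool) : Prop := out = looks_like_base58_py_alt value
instance (value : String) (out : Bool) : Decidable (Spec_looks_like_base58_py value out) := by unfold Spec_looks_like_base58_py; infer_instance

-- ===== CLAIM (what is proved, stated in full; the proofs are below) =====
def Claim_equal_looks_like_base58_py : Prop := ∀ (value : String), Dom_looks_like_base58_py value → Spec_looks_like_base58_py value (looks_like_base58_py value)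

-- ===== LEMMAS AND PROOFS =====

-- a code is in the alphabet and < 128 iff it is in the regex class's ranges
theorem b58_code_iff (n : Nat) :
    ((decide (n < 128)) && base58Codes.contains n) =
    ((49 ≤ n && n ≤ 57) || (65 ≤ n && n ≤ 72) || (74 ≤ n && n ≤ 78) ||
     (80 ≤ n && n ≤ 90) || (97 ≤ n && n ≤ 107) || (109 ≤ n && n ≤ 122)) := by
  rw [Bool.eq_iff_iff]
  simp only [base58Codes, List.contains_cons, List.contains_nil, Bool.or_eq_true,
    Bool.and_eq_true, decide_eq_true_eq, beq_iff_eq, Bool.false_eq_true, or_false]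
  omega

theorem b58_char (c : Char) :
    ((decide (c.toNat < 128)) && base58Codes.contains c.toNat) = b58Class c := by
  simpa [b58Class] using b58_code_iff c.toNat

-- A's tail (emptiness guard, ASCII check, membership scan) equals B's full-match test, for any char list
theorem tail_eq (l : List Char) :
    (if l = [] then false
     else if l.all (fun c => decide (c.toNat < 128)) then
       l.all (fun c => base58Codes.contains c.toNat)
     else false) =
    (!l.isEmpty && l.all b58Class) := by
  cases l with
  | nil => simp
  | cons a t =>
    simp only [List.isEmpty_cons, Bool.not_false, Bool.true_and, reduceCtorEq, if_false]
    have key : ∀ (m : List Char),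
        (m.all (fun c => decide (c.toNat < 128)) && m.all (fun c => base58Codes.contains c.toNat))
          = m.all b58Class := by
      intro m
      induction m with
      | nil => simp
      | cons b s ih =>
        simp only [List.all_cons, ← ih, ← b58_char b]
        cases decide (b.toNat < 128) <;> cases base58Codes.contains b.toNat <;>
          cases s.all (fun c => decide (c.toNat < 128)) <;>
          cases s.all (fun c => base58Codes.contains c.toNat) <;> rfl
    rw [← key]
    cases (a :: t).all (fun c => decide (c.toNat < 128)) <;> simp

-- ===== VERDICT (by name: the statement is the Claim_ definition above) =====
theorem looks_like_base58_py_spec : Claim_equal_looks_like_base58_py := by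
  intro value _
  unfold Spec_looks_like_base58_py looks_like_base58_py looks_like_base58_py_alt
  by_cases h : value.toList = []
  · rw [h]; decide
  · simp only [h, if_false]
    exact tail_eq _
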